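-- pv_equiv track=rewrite | github.com/zangkai-lab/ideaflow-creator | iftool/misc.py | grouped_into
-- ===== SOURCE A (Python) =====
-- import math
-- from typing import Dict, Any, Optional, TypeVar, Callable, Protocol, Generic, Type, List, Union, Iterable, Set
--
-- def grouped_into(iterable: Iterable, n: int) -> List[tuple]:
--     """Group an iterable into `n` groups."""
--
--     elements = list(iterable)
--     num_elements = len(elements)
--     num_elem_per_group = int(math.ceil(num_elements / n))
--     results: List[tuple] = []
--     split_idx = num_elements + n - n * num_elem_per_group
--     start = 0
--     for i in range(split_idx):
--         end = start + num_elem_per_group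
--         results.append(tuple(elements[start:end]))
--         start = end
--     for i in range(split_idx, n):
--         end = start + num_elem_per_group - 1
--         results.append(tuple(elements[start:end]))
--         start = end
--     return results
-- ===== SOURCE B (Python) =====
-- def grouped_into(iterable, n):
--     """Group an iterable into `n` groups."""
--     xs = list(iterable)
--     results = []
--     start = 0
--     k = n
--     while k > 0:
--         size = -(-(len(xs) - start) // k)  # ceil(remaining / k)
--         results.append(tuple(xs[start:start + size]))
--         start += size
--         k -= 1
--     return results
-- ===== Notes on version B (the rewrite author's own statement) =====
-- stated objective: alternative
-- what changed: Replaces A's precomputed ceil chunk size, split index and two staged slicing loops by a greedy loop that consumes the list: each step takes ceil(len(rest)/k) elements as the next group with k groups remaining, never computing a split index or a global group size.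
import Mathlib
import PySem

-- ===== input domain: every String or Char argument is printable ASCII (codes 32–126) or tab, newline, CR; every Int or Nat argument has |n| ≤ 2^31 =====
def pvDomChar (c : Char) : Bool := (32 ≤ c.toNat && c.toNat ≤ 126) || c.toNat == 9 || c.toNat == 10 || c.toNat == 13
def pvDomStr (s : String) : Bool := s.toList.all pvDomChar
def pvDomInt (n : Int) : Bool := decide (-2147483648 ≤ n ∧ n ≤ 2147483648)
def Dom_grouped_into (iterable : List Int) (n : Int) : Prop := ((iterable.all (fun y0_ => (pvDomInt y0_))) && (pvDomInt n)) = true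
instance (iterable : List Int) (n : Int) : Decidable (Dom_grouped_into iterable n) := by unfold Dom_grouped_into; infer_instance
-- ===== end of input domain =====

-- B replaces A's precomputed ceil chunk size / split index and two staged loops by a greedy
-- loop consuming the list: each step takes ceil(len(rest)/k) elements, with k groups left.

-- ===== PORT A =====
-- literal transliteration of A; int(math.ceil(m / n)) is ported as exact ceiling division
-- -((-m) // n), which equals the float computation for every list length in Dom.
def grouped_into (iterable : List Int) (n : Int) : List (List Int) :=
  let elements := iterable
  let numElements : Int := (elements.length : Int)
  let numElemPerGroup : Int := -(PySem.Int.floordiv (-numElements) n)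
  let splitIdx : Int := numElements + n - n * numElemPerGroup
  let s1 := (PySem.List.pyRange 0 splitIdx 1).foldl
    (fun (st : List (List Int) × Int) _ =>
      let e := st.2 + numElemPerGroup
      (st.1 ++ [PySem.List.slice elements (some st.2) (some e)], e))
    ([], 0)
  let s2 := (PySem.List.pyRange splitIdx n 1).foldl
    (fun (st : List (List Int) × Int) _ =>
      let e := st.2 + numElemPerGroup - 1
      (st.1 ++ [PySem.List.slice elements (some st.2) (some e)], e))
    s1
  s2.1

-- ===== PORT B =====
-- Source B's while-loop: start indexes the next unused element, k counts the remaining groups;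
-- -(-(len(xs) - start) // k) is Source B's integer ceiling division. The loop runs while k > 0,
-- so it is transcribed as structural recursion on k.toNat (zero exactly when k <= 0, minus 1 per step).
def pvGoAlt (xs : List Int) : Int → Nat → List (List Int)
  | _, 0 => []
  | start, k + 1 =>
    let size := -(PySem.Int.floordiv (-((xs.length : Int) - start)) ((k + 1 : Nat) : Int))
    PySem.List.slice xs (some start) (some (start + size)) ::
      pvGoAlt xs (start + size) k

def grouped_into_alt (iterable : List Int) (n : Int) : List (List Int) :=
  pvGoAlt iterable 0 n.toNat

-- ===== PRECONDITION & SPEC =====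
-- Pre_ excludes exactly n = 0, where the Python A raises ZeroDivisionError.
def Pre_grouped_into (iterable : List Int) (n : Int) : Prop := n ≠ 0
instance (iterable : List Int) (n : Int) : Decidable (Pre_grouped_into iterable n) := by
  unfold Pre_grouped_into; infer_instance
def pvWitness_grouped_into : List Int × Int := ([1, 2, 3, 4, 5], 2)

def Spec_grouped_into (iterable : List Int) (n : Int) (out : List (List Int)) : Prop :=
  out = grouped_into_alt iterable n
instance (iterable : List Int) (n : Int) (out : List (List Int)) : Decidable (Spec_grouped_into iterable n out) := by
  unfold Spec_grouped_into; infer_instance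

-- ===== CLAIM (what is proved, stated in full; the proofs are below) =====
def Claim_equal_grouped_into : Prop := ∀ (iterable : List Int) (n : Int), Dom_grouped_into iterable n → Pre_grouped_into iterable n → Spec_grouped_into iterable n (grouped_into iterable n)

-- ===== LEMMAS AND PROOFS =====

/-- Common spec: split `xs` into consecutive chunks of the given sizes (take/drop form). -/
def pvTD (xs : List Int) : List Nat → List (List Int)
  | [] => []
  | s :: rest => xs.take s :: pvTD (xs.drop s) rest

/-- The larger-groups-first size list: `m % k` groups of `m / k + 1`, then groups of `m / k`. -/
def pvSizes (m k : Nat) : List Nat :=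
  if k = 0 then []
  else List.replicate (m % k) (m / k + 1) ++ List.replicate (k - m % k) (m / k)

/-- A-side loop shape: slicing consecutive chunks of the given sizes out of `xs`. -/
def pvChunks (xs : List Int) (start : Int) : List Int → List (List Int)
  | [] => []
  | s :: rest => PySem.List.slice xs (some start) (some (start + s)) :: pvChunks xs (start + s) rest

theorem pvChunks_append (xs : List Int) (a b : List Int) (start : Int) :
    pvChunks xs start (a ++ b) = pvChunks xs start a ++ pvChunks xs (start + a.sum) b := by
  induction a generalizing start with
  | nil => simp [pvChunks]
  | cons s t ih => simp [pvChunks, ih, add_assoc]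

theorem pvFoldl_chunks (xs : List Int) (L : List Int) (sz : Int → Int)
    (res : List (List Int)) (start : Int) :
    L.foldl (fun (st : List (List Int) × Int) i =>
        (st.1 ++ [PySem.List.slice xs (some st.2) (some (st.2 + sz i))], st.2 + sz i)) (res, start)
      = (res ++ pvChunks xs start (L.map sz), start + (L.map sz).sum) := by
  induction L generalizing res start with
  | nil => simp [pvChunks]
  | cons a t ih => simp [List.foldl_cons, ih, pvChunks, add_assoc]

theorem pvChunks_eq_pvTD (xs : List Int) (sizes : List Nat) (st : Nat) :
    pvChunks xs (st : Int) (sizes.map (Nat.cast : Nat → Int)) = pvTD (xs.drop st) sizes := by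
  induction sizes generalizing st with
  | nil => simp [pvChunks, pvTD]
  | cons s rest ih =>
    simp only [List.map_cons, pvChunks, pvTD]
    rw [PySem.List.slice_natCast_add]
    congr 1
    have : ((st : Int) + (s : Int)) = ((st + s : Nat) : Int) := by push_cast; ring
    rw [this, ih, List.drop_drop]

/-- One greedy step on the size list: the first size is `ceil(m / (k+1))`. -/
theorem pvSizes_cons (m k : Nat) :
    pvSizes m (k + 1) =
      (if m % (k + 1) = 0 then m / (k + 1) else m / (k + 1) + 1) ::
        pvSizes (m - (if m % (k + 1) = 0 then m / (k + 1) else m / (k + 1) + 1)) k := by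
  have hqr : (k + 1) * (m / (k + 1)) + m % (k + 1) = m := Nat.div_add_mod m (k + 1)
  set q := m / (k + 1) with hq
  set r := m % (k + 1) with hr
  have hrlt : r < k + 1 := Nat.mod_lt m (Nat.succ_pos k)
  by_cases h0 : r = 0
  · simp only [if_pos h0]
    have hm' : m = k * q + q := by rw [← hqr, h0]; ring
    have hsub : m - q = k * q := Nat.sub_eq_of_eq_add hm'
    rcases Nat.eq_zero_or_pos k with hk | hk
    · subst hk
      simp only [pvSizes, hsub]
      rw [if_neg (by omega : (1:Nat) ≠ 0), ← hr, ← hq, h0]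
      simp
    · have hk0 : k ≠ 0 := by omega
      have hmod : (k * q) % k = 0 := Nat.mul_mod_right k q
      have hdiv : (k * q) / k = q := Nat.mul_div_cancel_left q hk
      simp only [pvSizes, hsub]
      rw [if_neg (by omega : k + 1 ≠ 0), if_neg hk0, ← hr, ← hq, h0, hmod, hdiv]
      simp [List.replicate_succ]
  · simp only [if_neg h0]
    obtain ⟨r', hr'⟩ : ∃ r', r = r' + 1 := ⟨r - 1, by omega⟩
    have hk : 0 < k := by omega
    have hm' : m = k * q + r' + (q + 1) := by rw [← hqr, hr']; ring
    have hsub : m - (q + 1) = k * q + r' := Nat.sub_eq_of_eq_add hm'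
    have hr'lt : r' < k := by omega
    have hmod : (k * q + r') % k = r' := by
      rw [Nat.mul_add_mod]; exact Nat.mod_eq_of_lt hr'lt
    have hdiv : (k * q + r') / k = q := by
      rw [Nat.mul_add_div hk, Nat.div_eq_of_lt hr'lt, Nat.add_zero]
    simp only [pvSizes, hsub]
    rw [if_neg (by omega : k + 1 ≠ 0), if_neg (by omega : k ≠ 0), ← hr, ← hq, hr', hmod, hdiv]
    have h1 : k + 1 - (r' + 1) = k - r' := by omega
    rw [h1]
    simp [List.replicate_succ]

theorem pvGoAlt_eq (xs : List Int) (k : Nat) :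
    ∀ st : Nat, st ≤ xs.length →
      pvGoAlt xs (st : Int) k = pvTD (xs.drop st) (pvSizes (xs.length - st) k) := by
  induction k with
  | zero => intro st _; simp [pvGoAlt, pvSizes, pvTD]
  | succ k ih =>
    intro st hst
    set m' := xs.length - st with hm'
    set s : Nat := if m' % (k + 1) = 0 then m' / (k + 1) else m' / (k + 1) + 1 with hs
    have hqr : (k + 1) * (m' / (k + 1)) + m' % (k + 1) = m' := Nat.div_add_mod m' (k + 1)
    have hrlt : m' % (k + 1) < k + 1 := Nat.mod_lt m' (Nat.succ_pos k)
    have hposI : (0 : Int) < ((k + 1 : Nat) : Int) := by exact_mod_cast Nat.succ_pos k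
    have hrem : (xs.length : Int) - (st : Int) = (m' : Int) := by
      rw [hm']; push_cast [hst]; ring
    have hceil : -(PySem.Int.floordiv (-((m' : Int))) ((k + 1 : Nat) : Int)) = (s : Int) := by
      rw [PySem.Int.neg_floordiv_neg_eq_iff_of_pos hposI]
      rw [hs]
      by_cases h0 : m' % (k + 1) = 0
      · rw [if_pos h0]
        have hEq : m' = (k + 1) * (m' / (k + 1)) := by omega
        have hI : (m' : Int) = ((k : Int) + 1) * ((m' / (k + 1) : Nat) : Int) := by
          exact_mod_cast hEq
        have hq0 : (0 : Int) ≤ ((m' / (k + 1) : Nat) : Int) := by positivity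
        constructor
        · push_cast; push_cast at hI; nlinarith [hI, hq0]
        · push_cast; push_cast at hI; nlinarith [hI]
      · rw [if_neg h0]
        constructor
        · push_cast; nlinarith [hqr, Nat.pos_of_ne_zero h0]
        · push_cast; nlinarith [hqr, hrlt]
    have hsle : s ≤ m' := by
      rw [hs]
      have hq : (k + 1) * (m' / (k + 1)) ≥ m' / (k + 1) := Nat.le_mul_of_pos_left _ (Nat.succ_pos k)
      by_cases h0 : m' % (k + 1) = 0
      · rw [if_pos h0]; exact Nat.div_le_self m' (k + 1)
      · rw [if_neg h0]; omega
    show PySem.List.slice xs (some (st : Int)) (some ((st : Int) + _)) :: pvGoAlt xs ((st : Int) + _) k = _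
    rw [hrem, hceil]
    rw [PySem.List.slice_natCast_add]
    have hcast : ((st : Int) + (s : Int)) = ((st + s : Nat) : Int) := by push_cast; ring
    rw [hcast, ih (st + s) (by omega)]
    rw [pvSizes_cons m' k, ← hs]
    have h1 : xs.length - (st + s) = m' - s := by omega
    rw [h1, pvTD, List.drop_drop]

theorem pvA_eq (xs : List Int) (N : Nat) (hN : 0 < N) :
    grouped_into xs (N : Int) = pvTD xs (pvSizes xs.length N) := by
  set m := xs.length with hm
  have hqr : N * (m / N) + m % N = m := Nat.div_add_mod m N
  have hrlt : m % N < N := Nat.mod_lt m hN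
  set q := m / N with hq
  set r := m % N with hr
  have hposI : (0 : Int) < (N : Int) := by exact_mod_cast hN
  unfold grouped_into
  simp only [← hm]
  by_cases h0 : r = 0
  · -- all N groups have size q
    have hceil : -(PySem.Int.floordiv (-((m : Int))) (N : Int)) = (q : Int) := by
      rw [PySem.Int.neg_floordiv_neg_eq_iff_of_pos hposI]
      have : m = N * q := by omega
      constructor
      · push_cast; nlinarith [this]
      · push_cast; nlinarith [this]
    have hsplit : (m : Int) + (N : Int) - (N : Int) * (q : Int) = (N : Int) := by
      have : m = N * q := by omega
      push_cast [this]; ring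
    rw [hceil, hsplit]
    rw [PySem.List.pyRange_one_eq_nil (a := (N : Int)) (b := (N : Int)) le_rfl]
    rw [pvFoldl_chunks xs _ (fun _ => (q : Int)) [] 0]
    simp only [List.foldl_nil, List.nil_append]
    rw [List.map_const', PySem.List.length_pyRange_one]
    have hlen : ((N : Int) - 0).toNat = N := by omega
    rw [hlen]
    have : List.replicate N ((q : Nat) : Int) = (List.replicate N q).map (Nat.cast : Nat → Int) := by
      simp
    rw [this]
    have h00 : (0 : Int) = ((0 : Nat) : Int) := rfl
    rw [h00, pvChunks_eq_pvTD xs (List.replicate N q) 0, List.drop_zero]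
    unfold pvSizes
    rw [if_neg (by omega : N ≠ 0), ← hr, h0]
    simp [← hq]
  · -- r groups of size q+1, then N-r groups of size q
    have hceil : -(PySem.Int.floordiv (-((m : Int))) (N : Int)) = ((q : Int) + 1) := by
      rw [PySem.Int.neg_floordiv_neg_eq_iff_of_pos hposI]
      constructor
      · push_cast; nlinarith [hqr, Nat.pos_of_ne_zero h0]
      · push_cast; nlinarith [hqr, hrlt]
    have hsplit : (m : Int) + (N : Int) - (N : Int) * ((q : Int) + 1) = (r : Int) := by
      have : m = N * q + r := by omega
      push_cast [this]; ring
    rw [hceil, hsplit]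
    simp only [show ∀ a : Int, a + ((q : Int) + 1) - 1 = a + (q : Int) from fun a => by ring]
    rw [pvFoldl_chunks xs _ (fun _ => (q : Int) + 1) [] 0,
        pvFoldl_chunks xs _ (fun _ => (q : Int)) _ _]
    simp only [List.nil_append]
    rw [List.map_const', List.map_const',
        PySem.List.length_pyRange_one, PySem.List.length_pyRange_one]
    have hlr : ((r : Int) - 0).toNat = r := by omega
    have hlr2 : ((N : Int) - (r : Int)).toNat = N - r := by omega
    rw [hlr, hlr2]
    have hcomb : pvChunks xs 0 (List.replicate r ((q : Int) + 1)) ++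
        pvChunks xs ((0 : Int) + (List.replicate r ((q : Int) + 1)).sum) (List.replicate (N - r) (q : Int))
        = pvChunks xs 0 (List.replicate r ((q : Int) + 1) ++ List.replicate (N - r) (q : Int)) := by
      rw [pvChunks_append]
    rw [hcomb]
    have hcast : List.replicate r ((q : Int) + 1) ++ List.replicate (N - r) (q : Int)
        = (List.replicate r (q + 1) ++ List.replicate (N - r) q).map (Nat.cast : Nat → Int) := by
      simp
    rw [hcast]
    have h00 : (0 : Int) = ((0 : Nat) : Int) := rfl
    rw [h00, pvChunks_eq_pvTD, List.drop_zero]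
    unfold pvSizes
    rw [if_neg (by omega : N ≠ 0), ← hr, ← hq]

theorem pvMain (xs : List Int) (n : Int) (hn : n ≠ 0) :
    grouped_into xs n = grouped_into_alt xs n := by
  unfold grouped_into_alt
  rcases lt_or_gt_of_ne hn with hneg | hpos
  · -- n < 0 : both programs return []
    have htz : n.toNat = 0 := Int.toNat_of_nonpos hneg.le
    rw [htz]

    set m : Int := (xs.length : Int) with hm
    have hfs : PySem.Int.floordiv m (-n) * (-n) + PySem.Int.mod m (-n) = m :=
      PySem.Int.floordiv_mul_add_mod m (-n)
    have h1 : PySem.Int.floordiv (-m) n = PySem.Int.floordiv m (-n) := by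
      have h := PySem.Int.floordiv_neg_neg m (-n)
      simpa using h
    unfold grouped_into
    simp only [← hm]
    set f : Int := PySem.Int.floordiv m (-n)
    set s : Int := PySem.Int.mod m (-n)
    have hpos' : (0:Int) < -n := by omega
    have hspos : 0 ≤ s ∧ s < -n := ⟨PySem.Int.mod_nonneg m hpos', PySem.Int.mod_lt m hpos'⟩
    have hsplit : m + n - n * -(PySem.Int.floordiv (-m) n) = s + n := by
      rw [h1]; linear_combination -hfs
    rw [hsplit]
    rw [PySem.List.pyRange_one_eq_nil (a := 0) (by omega),
        PySem.List.pyRange_one_eq_nil (a := s + n) (b := n) (by omega)]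
    simp [pvGoAlt]
  · -- n > 0
    obtain ⟨N, rfl⟩ : ∃ N : Nat, n = (N : Int) := ⟨n.toNat, (Int.toNat_of_nonneg hpos.le).symm⟩
    have hN : 0 < N := by exact_mod_cast hpos
    rw [Int.toNat_natCast, pvA_eq xs N hN]
    have h0 : ((0 : Nat) : Int) = (0 : Int) := rfl
    rw [← h0, pvGoAlt_eq xs N 0 (Nat.zero_le _), List.drop_zero, Nat.sub_zero]

-- ===== VERDICT (by name: the statement is the Claim_ definition above) =====
theorem grouped_into_spec : Claim_equal_grouped_into := by
  intro iterable n _ hpre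
  unfold Spec_grouped_into
  exact pvMain iterable n hpre
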